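-- pv_equiv track=rewrite | github.com/dakshgoel2008/AOC | 2025/Day 7/sol.py | part2
-- ===== SOURCE A (Python) =====
-- from collections import defaultdict
--
-- def part2(data):
--     # dp approach
--     rows = len(data)
--     cols = len(data[0])
--
--     dp = defaultdict(int)
--     st_row = 0
--     for r, line in enumerate(data):
--         if "S" in line:
--             st_row = r
--             dp[line.index("S")] = 1
--             break
--     exited = 0
--     for r in range(st_row, rows):
--         next_dp = defaultdict(int)
--         for c, cnt in dp.items():
--             ch = data[r][c]
--             if ch == "^":
--                 if c - 1 >= 0:
--                     next_dp[c - 1] += cnt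
--                 else:
--                     exited += cnt
--                 if c + 1 < cols:
--                     next_dp[c + 1] += cnt
--                 else:
--                     exited += cnt
--             else:
--                 next_dp[c] += cnt
--         dp = next_dp
--     return exited + sum(dp.values())
-- ===== SOURCE B (Python) =====
-- def part2(data):
--     cols = len(data[0])
--     st_row = start = None
--     for r, line in enumerate(data):
--         if "S" in line:
--             st_row, start = r, line.index("S")
--             break
--     if st_row is None:
--         return 0
--     ways = [1] * cols
--     for row in reversed(data[st_row:]):
--         ways = [((1 if c == 0 else ways[c - 1]) + (1 if c + 1 == cols else ways[c + 1]))
--                 if row[c] == "^" else ways[c]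
--                 for c in range(cols)]
--     return ways[start]
-- ===== Notes on version B (the rewrite author's own statement) =====
-- stated objective: alternative
-- what changed: Replaces A's top-down sparse propagation of a column->count dict row by row (with an 'exited' accumulator at the borders) with a bottom-up dense DP computed back-to-front: for each row from the bottom up, a full-width list ways[c] = number of exit paths starting at (r,c); the answer is the single lookup ways[start].
-- outside the precondition, e.g. on part2(['S..', '^']): A returns 2, B raises IndexError
import Mathlib
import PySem

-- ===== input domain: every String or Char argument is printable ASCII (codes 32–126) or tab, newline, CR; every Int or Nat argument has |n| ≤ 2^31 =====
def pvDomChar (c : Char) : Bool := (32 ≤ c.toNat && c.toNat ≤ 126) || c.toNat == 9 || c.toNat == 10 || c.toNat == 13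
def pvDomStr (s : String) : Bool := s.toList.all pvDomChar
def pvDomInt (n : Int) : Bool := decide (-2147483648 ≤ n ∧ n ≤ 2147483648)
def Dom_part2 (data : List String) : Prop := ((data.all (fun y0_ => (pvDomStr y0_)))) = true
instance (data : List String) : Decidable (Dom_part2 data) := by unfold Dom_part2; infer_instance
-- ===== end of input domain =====

-- B replaces A's top-down sparse dict propagation with a bottom-up dense per-row table of
-- exit counts (objective: alternative decomposition; same asymptotics, measured constant-factor speedup).

-- ===== PORT A =====
-- first-S scan: returns (st_row, dp) exactly as A's enumerate/break loop leaves them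
def part2Scan : List (Int × String) → Int × PySem.Dict Int Int
  | [] => (0, PySem.Dict.empty)
  | p :: rest =>
    if PySem.Str.isIn "S" p.2 then
      -- line.index("S") = find, guarded by "S" in line
      (p.1, PySem.Dict.empty.insert (PySem.Str.find p.2 "S") 1)
    else part2Scan rest

-- body of A's `for c, cnt in dp.items()` loop; `data[r][c]` is defaulted to ' ' where Python
-- would raise IndexError — such inputs are excluded by Pre_part2
def part2Item (data : List String) (cols r : Int)
    (acc : PySem.Dict Int Int × Int) (p : Int × Int) : PySem.Dict Int Int × Int :=
  let c := p.1
  let cnt := p.2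
  let ch : Char := ((PySem.List.pyGet? data r).bind (fun s => PySem.Str.pyGet? s c)).getD ' '
  if ch == '^' then
    let acc1 := if 0 ≤ c - 1 then (acc.1.modify (c - 1) 0 (· + cnt), acc.2)
                else (acc.1, acc.2 + cnt)
    if c + 1 < cols then (acc1.1.modify (c + 1) 0 (· + cnt), acc1.2)
    else (acc1.1, acc1.2 + cnt)
  else (acc.1.modify c 0 (· + cnt), acc.2)

-- one iteration of A's `for r in range(st_row, rows)` loop (state = (dp, exited))
def part2Row (data : List String) (cols : Int)
    (st : PySem.Dict Int Int × Int) (r : Int) : PySem.Dict Int Int × Int :=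
  st.1.items.foldl (part2Item data cols r) (PySem.Dict.empty, st.2)

def part2 (data : List String) : Int :=
  match PySem.List.pyGet? data 0 with
  | none => 0   -- len(data[0]) raises IndexError: excluded by Pre_part2
  | some row0 =>
    let rows : Int := PySem.List.len data
    let cols : Int := PySem.Str.len row0
    let sc := part2Scan (PySem.List.enumerate data)
    let res := (PySem.List.pyRange sc.1 rows).foldl (part2Row data cols) (sc.2, 0)
    res.2 + res.1.values.sum

-- ===== PORT B =====
-- B's scan for the first row containing 'S' (None ↔ none)
def part2ScanB : List (Int × String) → Option (Int × Int)
  | [] => none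
  | p :: rest =>
    if PySem.Str.isIn "S" p.2 then some (p.1, PySem.Str.find p.2 "S")
    else part2ScanB rest

-- B's list comprehension: next table of exit counts from one row (row[c] defaulted to ' '
-- where Python would raise IndexError — excluded by Pre_part2)
def part2RowB (cols : Int) (ways : List Int) (row : String) : List Int :=
  (PySem.List.pyRange 0 cols).map (fun c =>
    if (PySem.Str.pyGet? row c).getD ' ' == '^' then
      (if c == 0 then 1 else PySem.List.pyGetD ways (c - 1) 0)
        + (if c + 1 == cols then 1 else PySem.List.pyGetD ways (c + 1) 0)
    else PySem.List.pyGetD ways c 0)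

def part2_alt (data : List String) : Int :=
  match PySem.List.pyGet? data 0 with
  | none => 0   -- len(data[0]) raises IndexError: excluded by Pre_part2
  | some row0 =>
    let cols : Int := PySem.Str.len row0
    match part2ScanB (PySem.List.enumerate data) with
    | none => 0
    | some st =>
      let ways0 := PySem.List.pyRepeat [(1 : Int)] cols
      let ways := ((PySem.List.slice data (some st.1)).reverse).foldl (part2RowB cols) ways0
      PySem.List.pyGetD ways st.2 0

-- ===== PRECONDITION & SPEC =====
-- Pre_ excludes empty data (both programs raise IndexError on len(data[0])) and grids where,
-- from the FIRST row containing 'S' on, some row is shorter than row 0 or that 'S' sits at a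
-- column ≥ len(data[0]): exactly there B raises IndexError, while A raises too unless its
-- sparse propagation happens to miss every missing cell (see the cite in the claim).
def Pre_part2 (data : List String) : Prop :=
  data ≠ [] ∧
    ∀ k ∈ List.range data.length,
      PySem.Str.isIn "S" (data.getD k "") = true →
      (∃ j ∈ List.range k, PySem.Str.isIn "S" (data.getD j "") = true) ∨
      (PySem.Str.find (data.getD k "") "S" < PySem.Str.len (data.headD "") ∧
        ∀ j ∈ List.range data.length, k ≤ j →
          PySem.Str.len (data.headD "") ≤ PySem.Str.len (data.getD j ""))
instance (data : List String) : Decidable (Pre_part2 data) := by unfold Pre_part2; infer_instance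

def pvWitness_part2 : List String := ["S^", ".."]

def Spec_part2 (data : List String) (out : Int) : Prop := out = part2_alt data
instance (data : List String) (out : Int) : Decidable (Spec_part2 data out) := by unfold Spec_part2; infer_instance

-- ===== CLAIM (what is proved, stated in full; the proofs are below) =====
def Claim_equal_part2 : Prop := ∀ (data : List String), Dom_part2 data → Pre_part2 data → Spec_part2 data (part2 data)

-- ===== LEMMAS AND PROOFS =====

-- number of exit paths from column c with the given list of remaining rows (the common spec)
def exitW (cols : Int) : List String → Int → Int
  | [], _ => 1
  | row :: rest, c =>
    if c < 0 ∨ cols ≤ c then 1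
    else if (PySem.Str.pyGet? row c).getD ' ' == '^' then
      exitW cols rest (c - 1) + exitW cols rest (c + 1)
    else exitW cols rest c

lemma exitW_out (cols : Int) (l : List String) (c : Int) (h : c < 0 ∨ cols ≤ c) :
    exitW cols l c = 1 := by
  cases l with
  | nil => rfl
  | cons row rest => simp [exitW, h]

-- weighted sum of a dict's entries
def sumW (d : PySem.Dict Int Int) (W : Int → Int) : Int :=
  (d.items.map (fun p => p.2 * W p.1)).sum

lemma sumW_one (d : PySem.Dict Int Int) : sumW d (fun _ => 1) = d.values.sum := by
  simp [sumW, PySem.Dict.values]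

lemma sum_map_update (l : List Int) (hnd : l.Nodup) (k : Int) (hk : k ∈ l)
    (f g : Int → Int) (δ : Int) (hne : ∀ j ∈ l, j ≠ k → f j = g j) (hfk : f k = g k + δ) :
    (l.map f).sum = (l.map g).sum + δ := by
  induction l with
  | nil => simp at hk
  | cons a t ih =>
    rcases List.mem_cons.mp hk with h | h
    · subst h
      have ht : ∀ j ∈ t, f j = g j := by
        intro j hj
        exact hne j (List.mem_cons_of_mem _ hj) (fun e => (List.nodup_cons.mp hnd).1 (e ▸ hj))
      simp [hfk, List.map_congr_left ht]
      ring
    · have ha : f a = g a := hne a (List.mem_cons_self) (fun e => (List.nodup_cons.mp hnd).1 (e ▸ h))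
      have := ih (List.nodup_cons.mp hnd).2 h (fun j hj => hne j (List.mem_cons_of_mem _ hj))
      simp [ha, this]
      ring

lemma sumW_keys (d : PySem.Dict Int Int) (hnd : d.keys.Nodup) (W : Int → Int) :
    sumW d W = (d.keys.map (fun j => d.getD j 0 * W j)).sum := by
  rw [sumW, PySem.Dict.items_eq_map_keys d hnd 0, List.map_map]
  rfl

lemma sumW_modify (d : PySem.Dict Int Int) (hnd : d.keys.Nodup) (k cnt : Int) (W : Int → Int) :
    sumW (d.modify k 0 (· + cnt)) W = sumW d W + cnt * W k := by
  have hnd' : (d.modify k 0 (· + cnt)).keys.Nodup := by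
    rw [PySem.Dict.keys_modify]
    exact PySem.Dict.nodup_keys_insert _ _ _ hnd
  rw [sumW_keys _ hnd' W, sumW_keys d hnd W]
  have hget : ∀ j, (d.modify k 0 (· + cnt)).getD j 0 = if j = k then d.getD k 0 + cnt else d.getD j 0 :=
    fun j => PySem.Dict.getD_modify d k j 0 _
  by_cases hc : d.contains k = true
  · have hkeys : (d.modify k 0 (· + cnt)).keys = d.keys := by
      rw [PySem.Dict.keys_modify, PySem.Dict.keys_insert_of_contains d _ hc]
    rw [hkeys]
    exact sum_map_update d.keys hnd k ((PySem.Dict.contains_iff_mem_keys d k).mp hc) _ _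
      (cnt * W k) (fun j _ hj => by rw [hget j, if_neg hj]) (by simp [hget k]; ring)
  · have hkeys : (d.modify k 0 (· + cnt)).keys = d.keys ++ [k] := by
      rw [PySem.Dict.keys_modify, PySem.Dict.keys_insert_of_not_contains d _ (by simpa using hc)]
    have hkmem : k ∉ d.keys := fun h => hc ((PySem.Dict.contains_iff_mem_keys d k).mpr h)
    rw [hkeys, List.map_append, List.sum_append]
    have : ∀ j ∈ d.keys, (d.modify k 0 (· + cnt)).getD j 0 = d.getD j 0 := by
      intro j hj
      rw [hget j, if_neg (fun e => hkmem (by rwa [e] at hj))]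
    rw [List.map_congr_left (fun j hj => by rw [this j hj])]
    simp [hget k, PySem.Dict.getD_of_not_contains d 0 (by simpa using hc)]

lemma find_go_bounds (sub : List Char) (hsub : sub ≠ []) :
    ∀ (s : List Char) (k : Nat), PySem.Chars.find.go sub s k = -1 ∨
      ((k : Int) ≤ PySem.Chars.find.go sub s k ∧ PySem.Chars.find.go sub s k < (k : Int) + s.length) := by
  intro s
  induction s with
  | nil =>
    intro k
    left
    simp [PySem.Chars.find.go, List.isEmpty_iff, hsub]
  | cons a t ih =>
    intro k
    by_cases hp : sub.isPrefixOf (a :: t) = true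
    · right
      simp [PySem.Chars.find.go, hp]
    · have : PySem.Chars.find.go sub (a :: t) k = PySem.Chars.find.go sub t (k + 1) := by
        simp [PySem.Chars.find.go, hp]
      rw [this]
      rcases ih (k + 1) with h | ⟨h1, h2⟩
      · exact Or.inl h
      · right
        push_cast at h1 h2 ⊢
        constructor
        · omega
        · simp only [List.length_cons]
          push_cast
          omega

lemma find_bounds (s : String) (h : PySem.Str.isIn "S" s = true) :
    0 ≤ PySem.Str.find s "S" ∧ PySem.Str.find s "S" < PySem.Str.len s := by
  have hinf : ("S".toList) <:+: s.toList := (PySem.Str.isIn_iff_infix "S" s).mp h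
  have hne : PySem.Str.find s "S" ≠ -1 := by
    rw [Ne, PySem.Str.find_eq_neg_one_iff]
    simpa using hinf
  have hgo : PySem.Str.find s "S" = PySem.Chars.find.go ['S'] s.toList 0 := by
    rw [PySem.Str.find_eq]
    rfl
  rcases find_go_bounds ['S'] (by simp) s.toList 0 with h1 | ⟨h1, h2⟩
  · exact absurd (hgo.trans h1) hne
  · rw [hgo]
    refine ⟨by simpa using h1, ?_⟩
    have hlen : PySem.Str.len s = (s.toList.length : Int) := by
      simp [PySem.Str.len_eq]
    rw [hlen]
    simpa using h2

lemma nodup_keys_modify (d : PySem.Dict Int Int) (k c0 : Int) (f : Int → Int)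
    (h : d.keys.Nodup) : (d.modify k c0 f).keys.Nodup := by
  rw [PySem.Dict.keys_modify]
  exact PySem.Dict.nodup_keys_insert _ _ _ h

lemma mem_keys_modify (d : PySem.Dict Int Int) (k c0 j : Int) (f : Int → Int) :
    j ∈ (d.modify k c0 f).keys ↔ j = k ∨ j ∈ d.keys := by
  rw [PySem.Dict.keys_modify]
  exact PySem.Dict.mem_keys_insert _ _ _ _

lemma itemA (data : List String) (cols r : Int) (W : Int → Int)
    (HW : ∀ c, (c < 0 ∨ cols ≤ c) → W c = 1)
    (p : Int × Int) (hp : 0 ≤ p.1 ∧ p.1 < cols)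
    (acc : PySem.Dict Int Int × Int) (hnd : acc.1.keys.Nodup)
    (hr : ∀ j ∈ acc.1.keys, 0 ≤ j ∧ j < cols) :
    (part2Item data cols r acc p).1.keys.Nodup ∧
    (∀ j ∈ (part2Item data cols r acc p).1.keys, 0 ≤ j ∧ j < cols) ∧
    (part2Item data cols r acc p).2 + sumW (part2Item data cols r acc p).1 W
      = acc.2 + sumW acc.1 W + p.2 *
          (if (((PySem.List.pyGet? data r).bind (fun s => PySem.Str.pyGet? s p.1)).getD ' ') == '^'
           then W (p.1 - 1) + W (p.1 + 1) else W p.1) := by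
  simp only [part2Item]
  set ch := ((PySem.List.pyGet? data r).bind (fun s => PySem.Str.pyGet? s p.1)).getD ' ' with hch
  by_cases h1 : ch == '^'
  · rw [if_pos h1, if_pos h1]
    by_cases h2 : 0 ≤ p.1 - 1
    · rw [if_pos h2]
      have hnd1 : (acc.1.modify (p.1 - 1) 0 (· + p.2)).keys.Nodup := nodup_keys_modify _ _ _ _ hnd
      have hr1 : ∀ j ∈ (acc.1.modify (p.1 - 1) 0 (· + p.2)).keys, 0 ≤ j ∧ j < cols := by
        intro j hj
        rcases (mem_keys_modify _ _ _ _ _).mp hj with h | h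
        · subst h; omega
        · exact hr j h
      have hs1 : sumW (acc.1.modify (p.1 - 1) 0 (· + p.2)) W = sumW acc.1 W + p.2 * W (p.1 - 1) :=
        sumW_modify _ hnd _ _ _
      by_cases h3 : p.1 + 1 < cols
      · rw [if_pos h3]
        refine ⟨nodup_keys_modify _ _ _ _ hnd1, ?_, ?_⟩
        · intro j hj
          rcases (mem_keys_modify _ _ _ _ _).mp hj with h | h
          · subst h; omega
          · exact hr1 j h
        · rw [sumW_modify _ hnd1 _ _ _, hs1]
          ring
      · rw [if_neg h3]
        refine ⟨hnd1, hr1, ?_⟩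
        rw [hs1, HW (p.1 + 1) (by omega)]
        ring
    · rw [if_neg h2]
      by_cases h3 : p.1 + 1 < cols
      · rw [if_pos h3]
        refine ⟨nodup_keys_modify _ _ _ _ hnd, ?_, ?_⟩
        · intro j hj
          rcases (mem_keys_modify _ _ _ _ _).mp hj with h | h
          · subst h; omega
          · exact hr j h
        · rw [sumW_modify _ hnd _ _ _, HW (p.1 - 1) (by omega)]
          ring
      · rw [if_neg h3]
        refine ⟨hnd, hr, ?_⟩
        rw [HW (p.1 - 1) (by omega), HW (p.1 + 1) (by omega)]
        ring
  · rw [if_neg h1, if_neg h1]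
    refine ⟨nodup_keys_modify _ _ _ _ hnd, ?_, ?_⟩
    · intro j hj
      rcases (mem_keys_modify _ _ _ _ _).mp hj with h | h
      · subst h; omega
      · exact hr j h
    · rw [sumW_modify _ hnd _ _ _]
      ring

lemma innerA (data : List String) (cols r : Int) (W : Int → Int)
    (HW : ∀ c, (c < 0 ∨ cols ≤ c) → W c = 1) :
    ∀ (L : List (Int × Int)), (∀ p ∈ L, 0 ≤ p.1 ∧ p.1 < cols) →
    ∀ (acc : PySem.Dict Int Int × Int), acc.1.keys.Nodup →
      (∀ j ∈ acc.1.keys, 0 ≤ j ∧ j < cols) →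
      (L.foldl (part2Item data cols r) acc).1.keys.Nodup ∧
      (∀ j ∈ (L.foldl (part2Item data cols r) acc).1.keys, 0 ≤ j ∧ j < cols) ∧
      (L.foldl (part2Item data cols r) acc).2 + sumW (L.foldl (part2Item data cols r) acc).1 W
        = acc.2 + sumW acc.1 W
          + (L.map (fun p => p.2 *
              (if (((PySem.List.pyGet? data r).bind (fun s => PySem.Str.pyGet? s p.1)).getD ' ') == '^'
               then W (p.1 - 1) + W (p.1 + 1) else W p.1))).sum := by
  intro L
  induction L with
  | nil => intro _ acc hnd hr; exact ⟨hnd, hr, by simp⟩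
  | cons p L ih =>
    intro hL acc hnd hr
    obtain ⟨h1, h2, h3⟩ := itemA data cols r W HW p (hL p (by simp)) acc hnd hr
    obtain ⟨g1, g2, g3⟩ := ih (fun q hq => hL q (by simp [hq])) (part2Item data cols r acc p) h1 h2
    refine ⟨g1, g2, ?_⟩
    rw [List.foldl_cons] at *
    rw [g3, h3]
    simp
    ring

lemma outerA (data : List String) (cols : Int) :
    ∀ (n r : Nat), data.length - r = n → r ≤ data.length →
    ∀ (acc : PySem.Dict Int Int × Int), acc.1.keys.Nodup →
      (∀ j ∈ acc.1.keys, 0 ≤ j ∧ j < cols) →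
      ((PySem.List.pyRange r data.length).foldl (part2Row data cols) acc).2
        + sumW ((PySem.List.pyRange r data.length).foldl (part2Row data cols) acc).1 (fun _ => 1)
        = acc.2 + sumW acc.1 (exitW cols (data.drop r)) := by
  intro n
  induction n with
  | zero =>
    intro r h0 hle acc hnd hr
    have hr' : r = data.length := by omega
    subst hr'
    rw [PySem.List.pyRange_one_eq_nil (by omega)]
    simp only [List.foldl_nil]
    rw [List.drop_of_length_le (by omega)]
    congr 1
  | succ n ih =>
    intro r h0 hle acc hnd hr
    have hlt : r < data.length := by omega
    rw [PySem.List.pyRange_one_cons (by exact_mod_cast hlt)]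
    rw [List.foldl_cons]
    -- the row step
    have hget : PySem.List.pyGet? data (r : Int) = some (data[r]'hlt) := by
      rw [PySem.List.pyGet?_natCast, List.getElem?_eq_getElem hlt]
    obtain ⟨g1, g2, g3⟩ := innerA data cols (r : Int) (exitW cols (data.drop (r + 1)))
      (exitW_out cols (data.drop (r + 1)))
      acc.1.items
      (fun p hp => hr p.1 (PySem.Dict.mem_keys_of_mem_items _ hp))
      (PySem.Dict.empty, acc.2) (by exact PySem.Dict.nodup_keys_empty) (by simp)
    have hstep : (part2Row data cols acc (r : Int)).2
        + sumW (part2Row data cols acc (r : Int)).1 (exitW cols (data.drop (r + 1)))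
        = acc.2 + sumW acc.1 (exitW cols (data.drop r)) := by
      rw [part2Row, g3]
      have hempty : sumW PySem.Dict.empty (exitW cols (data.drop (r + 1))) = 0 := by
        simp [sumW, PySem.Dict.empty]
      rw [hempty]
      have hdrop : data.drop r = data[r]'hlt :: data.drop (r + 1) :=
        (List.getElem_cons_drop hlt).symm
      rw [hdrop, sumW]
      rw [List.map_congr_left (l := acc.1.items)
        (f := fun p => p.2 * exitW cols (data[r]'hlt :: data.drop (r + 1)) p.1)
        (g := fun p => p.2 *
          (if (((PySem.List.pyGet? data (r : Int)).bind (fun s => PySem.Str.pyGet? s p.1)).getD ' ') == '^'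
           then exitW cols (data.drop (r + 1)) (p.1 - 1) + exitW cols (data.drop (r + 1)) (p.1 + 1)
           else exitW cols (data.drop (r + 1)) p.1))
        ?_]
      · ring
      · intro p hp
        have hpk := hr p.1 (PySem.Dict.mem_keys_of_mem_items _ hp)
        rw [hget]
        simp only [Option.bind_some]
        rw [exitW, if_neg (by omega)]
        rfl
    have hcast : (r : Int) + 1 = ((r + 1 : Nat) : Int) := by push_cast; ring
    rw [hcast]
    rw [ih (r + 1) (by omega) (by omega) (part2Row data cols acc (r : Int)) g1 g2]
    exact hstep

lemma scanB_none (l : List (Int × String)) (h : part2ScanB l = none) :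
    part2Scan l = (0, PySem.Dict.empty) := by
  induction l with
  | nil => rfl
  | cons p rest ih =>
    simp only [part2ScanB] at h
    simp only [part2Scan]
    by_cases hp : PySem.Str.isIn "S" p.2 = true
    · rw [if_pos hp] at h; exact absurd h (by simp)
    · rw [if_neg hp] at h
      rw [if_neg hp]
      exact ih h

lemma scanB_some (l : List (Int × String)) (r i : Int) (h : part2ScanB l = some (r, i)) :
    part2Scan l = (r, PySem.Dict.empty.insert i 1) := by
  induction l with
  | nil => simp [part2ScanB] at h
  | cons p rest ih =>
    simp only [part2ScanB] at h
    simp only [part2Scan]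
    by_cases hp : PySem.Str.isIn "S" p.2 = true
    · rw [if_pos hp] at h
      rw [if_pos hp]
      obtain ⟨hr, hi⟩ : p.1 = r ∧ PySem.Str.find p.2 "S" = i := by
        simpa using h
      rw [hr, hi]
    · rw [if_neg hp] at h
      rw [if_neg hp]
      exact ih h

lemma scanB_enum : ∀ (xs : List String) (s r i : Int),
    part2ScanB (PySem.List.enumerate xs s) = some (r, i) →
    ∃ k : Nat, k < xs.length ∧ r = s + (k : Int) ∧
      PySem.Str.isIn "S" (xs.getD k "") = true ∧
      i = PySem.Str.find (xs.getD k "") "S" ∧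
      ∀ j : Nat, j < k → PySem.Str.isIn "S" (xs.getD j "") = false := by
  intro xs
  induction xs with
  | nil => intro s r i h; simp [PySem.List.enumerate_nil, part2ScanB] at h
  | cons x t ih =>
    intro s r i h
    rw [PySem.List.enumerate_cons] at h
    simp only [part2ScanB] at h
    by_cases hx : PySem.Str.isIn "S" x = true
    · rw [if_pos hx] at h
      obtain ⟨hr, hi⟩ : s = r ∧ PySem.Str.find x "S" = i := by simpa using h
      exact ⟨0, by simp, by omega, by simpa using hx, by simp [hi.symm], by omega⟩
    · rw [if_neg hx] at h
      obtain ⟨k, hk, hr, hS, hi, hfirst⟩ := ih (s + 1) r i h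
      refine ⟨k + 1, by simpa using hk, by push_cast at hr ⊢; omega, by simpa using hS,
        by simpa using hi, ?_⟩
      intro j hj
      cases j with
      | zero => simpa using hx
      | succ j => exact hfirst j (by omega)

lemma rowB_step (m : Nat) (row : String) (rest : List String) :
    part2RowB (m : Int) ((PySem.List.pyRange 0 (m : Int)).map (fun c => exitW (m : Int) rest c)) row
      = (PySem.List.pyRange 0 (m : Int)).map (fun c => exitW (m : Int) (row :: rest) c) := by
  unfold part2RowB
  apply List.map_congr_left
  intro c hc
  obtain ⟨hc0, hcm⟩ := (PySem.List.mem_pyRange_one).mp hc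
  obtain ⟨j, rfl⟩ : ∃ j : Nat, c = (j : Int) := ⟨c.toNat, (Int.toNat_of_nonneg hc0).symm⟩
  have hj : j < m := by exact_mod_cast hcm
  rw [show exitW (m : Int) (row :: rest) (j : Int)
      = if (PySem.Str.pyGet? row (j : Int)).getD ' ' == '^' then
          exitW (m : Int) rest ((j : Int) - 1) + exitW (m : Int) rest ((j : Int) + 1)
        else exitW (m : Int) rest (j : Int) from by
    rw [exitW, if_neg (by omega)]]
  by_cases hch : (PySem.Str.pyGet? row (j : Int)).getD ' ' == '^'
  · rw [if_pos hch, if_pos hch]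
    congr 1
    · by_cases hj0 : j = 0
      · subst hj0
        rw [if_pos (by simp), exitW_out _ _ _ (by left; norm_num)]
      · rw [if_neg (by simpa using (by exact_mod_cast fun h => hj0 (by exact_mod_cast h) : (j : Int) ≠ 0))]
        have : (j : Int) - 1 = ((j - 1 : Nat) : Int) := by omega
        rw [this, PySem.List.pyGetD_map_pyRange _ m (j-1) 0 (by omega)]
    · by_cases hjm : j + 1 = m
      · rw [if_pos (show (((j:Int) + 1 == (m:Int))) = true by rw [beq_iff_eq]; omega), exitW_out _ _ _ (by right; omega)]
      · rw [if_neg (show ¬ (((j:Int) + 1 == (m:Int))) = true by simp only [beq_iff_eq]; omega)]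
        have : (j : Int) + 1 = ((j + 1 : Nat) : Int) := by push_cast; ring
        rw [this, PySem.List.pyGetD_map_pyRange _ m (j+1) 0 (by omega)]
  · rw [if_neg hch, if_neg hch, PySem.List.pyGetD_map_pyRange _ m j 0 hj]

lemma waysB (m : Nat) (l : List String) :
    l.reverse.foldl (part2RowB (m : Int)) (PySem.List.pyRepeat [(1 : Int)] (m : Int))
      = (PySem.List.pyRange 0 (m : Int)).map (fun c => exitW (m : Int) l c) := by
  induction l with
  | nil =>
    simp only [List.reverse_nil, List.foldl_nil, PySem.List.pyRepeat_singleton]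
    rw [show (fun c => exitW (m : Int) [] c) = (fun _ : Int => (1 : Int)) from rfl]
    rw [List.map_const', PySem.List.length_pyRange_one]
    congr 1
  | cons row rest ih =>
    rw [List.reverse_cons, List.foldl_append, ih]
    simpa using rowB_step m row rest

lemma A_eval_empty (data : List String) (cols : Int) :
    ((PySem.List.pyRange 0 data.length).foldl (part2Row data cols) (PySem.Dict.empty, 0)).2
      + ((PySem.List.pyRange 0 data.length).foldl (part2Row data cols) (PySem.Dict.empty, 0)).1.values.sum
      = 0 := by
  have h := outerA data cols data.length 0 (by omega) (by omega)
    (PySem.Dict.empty, 0) PySem.Dict.nodup_keys_empty (by simp)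
  simp only [Nat.cast_zero] at h
  have hz : sumW PySem.Dict.empty (exitW cols (data.drop 0)) = 0 := by
    simp [sumW, PySem.Dict.empty]
  rw [hz] at h
  have hv := sumW_one ((PySem.List.pyRange 0 data.length).foldl (part2Row data cols) (PySem.Dict.empty, 0)).1
  omega

lemma A_eval (data : List String) (cols : Int) (k : Nat) (hk : k ≤ data.length) (i : Int)
    (hi : 0 ≤ i ∧ i < cols) :
    ((PySem.List.pyRange k data.length).foldl (part2Row data cols) (PySem.Dict.empty.insert i 1, 0)).2
      + ((PySem.List.pyRange k data.length).foldl (part2Row data cols) (PySem.Dict.empty.insert i 1, 0)).1.values.sum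
      = exitW cols (data.drop k) i := by
  have hkeys : (PySem.Dict.empty.insert i (1 : Int)).keys = [i] := by
    rw [PySem.Dict.keys_insert_of_not_contains _ _ (by simp)]
    simp
  have h := outerA data cols (data.length - k) k (by omega) hk
    (PySem.Dict.empty.insert i 1, 0)
    (by rw [hkeys]; simp)
    (by rw [hkeys]; intro j hj; simp at hj; subst hj; exact hi)
  have hitems : (PySem.Dict.empty.insert i (1 : Int)).items = [(i, 1)] := by
    rw [PySem.Dict.items_insert_of_not_contains _ _ (by simp)]
    simp [PySem.Dict.empty]
  have hs : sumW (PySem.Dict.empty.insert i 1) (exitW cols (data.drop k)) = exitW cols (data.drop k) i := by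
    rw [sumW, hitems]
    simp
  rw [hs] at h
  have hv := sumW_one ((PySem.List.pyRange k data.length).foldl (part2Row data cols) (PySem.Dict.empty.insert i 1, 0)).1
  omega

lemma main_eq (data : List String) (hpre : Pre_part2 data) : part2 data = part2_alt data := by
  obtain ⟨hne, hrect⟩ := hpre
  cases data with
  | nil => exact absurd rfl hne
  | cons row0 rest =>
    have h0 : PySem.List.pyGet? (row0 :: rest) 0 = some row0 := by
      simp [PySem.List.pyGet?, PySem.List.pyIdx?]
    rw [part2, part2_alt, h0]
    cases hs : part2ScanB (PySem.List.enumerate (row0 :: rest)) with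
    | none =>
      have hscan := scanB_none _ hs
      simp only [hscan, PySem.List.len_eq]
      exact A_eval_empty (row0 :: rest) (PySem.Str.len row0)
    | some st =>
      have hscan := scanB_some _ st.1 st.2 (by rw [hs])
      simp only [hscan, PySem.List.len_eq]
      -- identify the first row containing 'S'
      obtain ⟨k, hk, hr0, hSin, hifind, hfirst⟩ := scanB_enum (row0 :: rest) 0 st.1 st.2 (by rw [hs])
      have hst1 : st.1 = (k : Int) := by omega
      -- the start column is in range: 0 ≤ find < len row0, by Pre_
      have hpk := hrect k (by simpa using hk) hSin
      have hnotearlier : ¬ ∃ j ∈ List.range k, PySem.Str.isIn "S" ((row0 :: rest).getD j "") = true := by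
        rintro ⟨j, hjk, hjS⟩
        rw [List.mem_range] at hjk
        rw [hfirst j hjk] at hjS
        exact Bool.noConfusion hjS
      have hfb := find_bounds _ hSin
      have hib : 0 ≤ st.2 ∧ st.2 < PySem.Str.len row0 := by
        rcases hpk with h | ⟨h1, _⟩
        · exact absurd h hnotearlier
        · simp only [List.headD_cons] at h1
          omega
      -- A's side
      rw [hst1]
      rw [A_eval (row0 :: rest) (PySem.Str.len row0) k (by omega) st.2 hib]
      -- B's side
      have hm : PySem.Str.len row0 = ((PySem.Str.len row0).toNat : Int) := by omega
      rw [PySem.List.slice_from _ (by omega)]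
      have htn : ((k : Int)).toNat = k := by omega
      rw [htn, hm, waysB ((PySem.Str.len row0).toNat) ((row0 :: rest).drop k)]
      have hi2 : st.2 = ((st.2.toNat : Nat) : Int) := by omega
      rw [hi2, PySem.List.pyGetD_map_pyRange _ _ _ 0 (by omega)]

-- ===== VERDICT (by name: the statement is the Claim_ definition above) =====
theorem part2_spec : Claim_equal_part2 := by
  unfold Claim_equal_part2
  intro data _ hpre
  unfold Spec_part2
  exact main_eq data hpre
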